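-- pv_equiv track=rewrite | github.com/fluiddyn/fluidsimfoam | src/fluidsimfoam/foam_input_files/fv_options.py | get_selection_mode
-- ===== SOURCE A (Python) =====
-- def get_selection_mode(cell_zone, cell_set, points):
--     is_not_none = [var is not None for var in (cell_zone, cell_set, points)]
--     nb_var_not_none = sum(is_not_none)
--
--     if nb_var_not_none == 0:
--         return "all"
--     elif nb_var_not_none > 1:
--         raise ValueError
--
--     if cell_zone is not None:
--         selection_mode = "cellZone"
--     elif cell_set is not None:
--         selection_mode = "cellSet"
--     elif points is not None:
--         selection_mode = "points"
--     else:
--         raise RuntimeError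
--
--     return selection_mode
-- ===== SOURCE B (Python) =====
-- _MODE_BY_MASK = {0: "all", 1: "cellZone", 2: "cellSet", 4: "points"}
--
--
-- def get_selection_mode(cell_zone, cell_set, points):
--     mask = (
--         (cell_zone is not None)
--         | (cell_set is not None) << 1
--         | (points is not None) << 2
--     )
--     try:
--         return _MODE_BY_MASK[mask]
--     except KeyError:
--         raise ValueError
-- ===== Notes on version B (the rewrite author's own statement) =====
-- stated objective: alternative
-- what changed: Encodes the three is-not-None flags as a 3-bit integer mask and resolves the mode by a single table lookup keyed on the mask (KeyError on masks with more than one bit set becomes ValueError), instead of counting non-None arguments and re-testing each one in an if-chain.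
import Mathlib
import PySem

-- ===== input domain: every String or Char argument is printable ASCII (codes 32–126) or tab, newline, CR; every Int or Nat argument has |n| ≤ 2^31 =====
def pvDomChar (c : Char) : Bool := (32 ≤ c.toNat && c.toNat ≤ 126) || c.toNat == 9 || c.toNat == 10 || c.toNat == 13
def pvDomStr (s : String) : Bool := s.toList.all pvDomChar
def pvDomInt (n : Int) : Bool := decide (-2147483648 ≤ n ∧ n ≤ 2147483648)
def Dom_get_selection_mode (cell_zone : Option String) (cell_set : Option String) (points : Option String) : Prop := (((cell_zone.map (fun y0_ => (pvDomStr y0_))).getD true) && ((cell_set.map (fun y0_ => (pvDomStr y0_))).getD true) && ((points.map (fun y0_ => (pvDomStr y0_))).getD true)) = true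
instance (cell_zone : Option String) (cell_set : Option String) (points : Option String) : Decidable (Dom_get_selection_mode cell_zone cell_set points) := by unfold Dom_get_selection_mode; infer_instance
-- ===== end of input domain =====

-- ===== PORT A =====
-- B encodes the is-not-None flags as a 3-bit mask and resolves the mode by one
-- table lookup instead of counting then re-testing each argument (objective: alternative).
def get_selection_mode (cell_zone : Option String) (cell_set : Option String) (points : Option String) : String :=
  let is_not_none : List Bool := [cell_zone.isSome, cell_set.isSome, points.isSome]
  let nb_var_not_none : Int := (is_not_none.map (fun b => if b then (1 : Int) else 0)).sum
  if nb_var_not_none = 0 then "all"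
  else if nb_var_not_none > 1 then ""  -- raise ValueError: excluded by Pre_
  else
    if cell_zone.isSome then "cellZone"
    else if cell_set.isSome then "cellSet"
    else if points.isSome then "points"
    else ""  -- raise RuntimeError: unreachable

-- ===== PORT B =====
def pvModeByMask : PySem.Dict Int String :=
  PySem.Dict.ofList [((0 : Int), "all"), (1, "cellZone"), (2, "cellSet"), (4, "points")]

def get_selection_mode_alt (cell_zone : Option String) (cell_set : Option String) (points : Option String) : String :=
  let mask : Int :=
    (if cell_zone.isSome then 1 else 0)
    ||| ((if cell_set.isSome then 1 else 0) <<< 1)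
    ||| ((if points.isSome then 1 else 0) <<< 2)
  match PySem.Dict.get? pvModeByMask mask with
  | some m => m
  | none => ""  -- KeyError re-raised as ValueError: excluded by Pre_

-- ===== PRECONDITION & SPEC =====
-- Pre_ excludes the inputs where more than one argument is not None: A and B both raise ValueError there.
def Pre_get_selection_mode (cell_zone : Option String) (cell_set : Option String) (points : Option String) : Prop :=
  ((if cell_zone.isSome then (1 : Int) else 0) + (if cell_set.isSome then 1 else 0) + (if points.isSome then 1 else 0)) ≤ 1
instance (cell_zone : Option String) (cell_set : Option String) (points : Option String) : Decidable (Pre_get_selection_mode cell_zone cell_set points) := by unfold Pre_get_selection_mode; infer_instance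

def pvWitness_get_selection_mode : Option String × Option String × Option String := (some "zone1", none, none)

def Spec_get_selection_mode (cell_zone : Option String) (cell_set : Option String) (points : Option String) (out : String) : Prop := out = get_selection_mode_alt cell_zone cell_set points
instance (cell_zone : Option String) (cell_set : Option String) (points : Option String) (out : String) : Decidable (Spec_get_selection_mode cell_zone cell_set points out) := by unfold Spec_get_selection_mode; infer_instance

-- ===== CLAIM (what is proved, stated in full; the proofs are below) =====
def Claim_equal_get_selection_mode : Prop := ∀ (cell_zone : Option String) (cell_set : Option String) (points : Option String), Dom_get_selection_mode cell_zone cell_set points → Pre_get_selection_mode cell_zone cell_set points → Spec_get_selection_mode cell_zone cell_set points (get_selection_mode cell_zone cell_set points)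

-- ===== LEMMAS AND PROOFS =====

-- ===== VERDICT (by name: the statement is the Claim_ definition above) =====
theorem get_selection_mode_spec : Claim_equal_get_selection_mode := by
  intro cz cs p _ hpre
  unfold Spec_get_selection_mode
  cases cz <;> cases cs <;> cases p <;>
    simp_all [get_selection_mode, get_selection_mode_alt, pvModeByMask,
      PySem.Dict.get?, PySem.Dict.ofList, Pre_get_selection_mode]
  all_goals rfl
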